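-- pv_equiv track=rewrite | github.com/JN-Jeong/Coding | 백준/삼성 SW 역량 테스트 기출 문제/나무 재테크_16235 re-1.py | spring_summer
-- ===== SOURCE A (Python) =====
-- def spring_summer(board, trees):
--     for i in range(len(board)):
--         for j in range(len(board[0])):
--             if trees[i][j]:
--                 for k in range(len(trees[i][j])):
--                     age = trees[i][j][k]
--                     if age <= board[i][j]:  # spring
--                         board[i][j] -= age
--                         trees[i][j][k] += 1
--                     else:  # summer
--                         for _ in range(k, len(trees[i][j])):
--                             board[i][j] += trees[i][j].pop() // 2
--                         break
--
--     return board, trees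
-- ===== SOURCE B (Python) =====
-- def spring_summer(board, trees):
--     for i in range(len(board)):
--         for j in range(len(board[0])):
--             cell = trees[i][j]
--             if not cell:
--                 continue
--             P = board[i][j]
--             # prefix-sum table of the ages, in order
--             cum = []
--             s = 0
--             for a in cell:
--                 s += a
--                 cum.append(s)
--             # split point: first prefix sum exceeding the nutrient
--             k = next((idx for idx, c in enumerate(cum) if c > P), len(cell))
--             spent = cum[k - 1] if k else 0
--             board[i][j] = P - spent + sum(a // 2 for a in cell[k:])
--             trees[i][j] = [a + 1 for a in cell[:k]]
--     return board, trees
-- ===== Notes on version B (the rewrite author's own statement) =====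
-- stated objective: simpler
-- what changed: Per cell, B builds the prefix-sum table of the ages once, locates the survivor count as the first prefix sum exceeding the nutrient, and reconstructs the cell and the nutrient value from that split point, instead of A's step-by-step nutrient decrement with an inner end-popping loop for the dead tail.
import Mathlib
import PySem

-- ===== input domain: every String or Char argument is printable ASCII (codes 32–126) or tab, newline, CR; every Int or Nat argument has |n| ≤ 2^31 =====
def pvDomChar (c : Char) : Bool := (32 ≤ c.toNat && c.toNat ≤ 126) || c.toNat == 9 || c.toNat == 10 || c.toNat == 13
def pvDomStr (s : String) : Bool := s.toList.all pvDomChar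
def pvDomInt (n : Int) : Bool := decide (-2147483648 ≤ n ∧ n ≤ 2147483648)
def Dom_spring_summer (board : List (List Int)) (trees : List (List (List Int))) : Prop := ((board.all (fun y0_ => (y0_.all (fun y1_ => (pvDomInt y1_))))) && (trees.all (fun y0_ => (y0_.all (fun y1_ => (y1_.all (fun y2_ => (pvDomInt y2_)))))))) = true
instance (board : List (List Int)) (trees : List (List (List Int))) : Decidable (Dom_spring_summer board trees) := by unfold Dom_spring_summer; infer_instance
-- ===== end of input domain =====

-- B replaces A's step-by-step nutrient decrement and end-popping with a prefix-sum table
-- plus a single split-point search per cell (objective: simpler).  Both Pythons mutate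
-- board/trees in place identically; the equivalence proved here is about the return value.

-- ===== PORT A =====

-- board[i][j] read/write helpers (indices are in range under Pre_)
def pvGet2 (m : List (List Int)) (i j : Nat) : Int := (m.getD i []).getD j 0
def pvSet2 (m : List (List Int)) (i j : Nat) (v : Int) : List (List Int) :=
  m.set i ((m.getD i []).set j v)
def pvGet2t (m : List (List (List Int))) (i j : Nat) : List Int := (m.getD i []).getD j []
def pvSet2t (m : List (List (List Int))) (i j : Nat) (v : List Int) : List (List (List Int)) :=
  m.set i ((m.getD i []).set j v)

-- 'for _ in range(k, len(trees[i][j])): board[i][j] += trees[i][j].pop() // 2'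
def popLoopA : Nat → Int → List Int → Int × List Int
  | 0, p, cell => (p, cell)
  | m + 1, p, cell =>
      popLoopA m (p + PySem.Int.floordiv (cell.getLastD 0) 2) cell.dropLast

-- 'for k in range(len(trees[i][j])): …' with the break; n = the length taken at loop entry
def kLoopA (n : Nat) (p : Int) (cell : List Int) : Nat → Int × List Int
  | k =>
    if _h : k < n then
      let age := cell.getD k 0
      if age ≤ p then kLoopA n (p - age) (cell.set k (age + 1)) (k + 1)
      else popLoopA (cell.length - k) p cell
    else (p, cell)
  termination_by k => n - k

def cellStepA (st : List (List Int) × List (List (List Int))) (i j : Nat) :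
    List (List Int) × List (List (List Int)) :=
  let cell := pvGet2t st.2 i j
  if cell = [] then st
  else
    let r := kLoopA cell.length (pvGet2 st.1 i j) cell 0
    (pvSet2 st.1 i j r.1, pvSet2t st.2 i j r.2)

def spring_summer (board : List (List Int)) (trees : List (List (List Int))) :
    List (List Int) × List (List (List Int)) :=
  (List.range board.length).foldl
    (fun st i =>
      (List.range (st.1.getD 0 []).length).foldl (fun st' j => cellStepA st' i j) st)
    (board, trees)

-- ===== PORT B =====

-- cum = []; s = 0; for a in cell: s += a; cum.append(s)
def prefixSumsB (s : Int) : List Int → List Int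
  | [] => []
  | a :: r => (s + a) :: prefixSumsB (s + a) r

-- sum(a // 2 for a in cell[k:])
def halfSumB (l : List Int) : Int := l.foldl (fun s a => s + PySem.Int.floordiv a 2) 0

-- the per-cell body of Source B's loop
def cellB (p : Int) (cell : List Int) : Int × List Int :=
  let cum := prefixSumsB 0 cell
  let k := (cum.findIdx? (fun c => decide (p < c))).getD cell.length
  let spent := if k = 0 then 0 else cum.getD (k - 1) 0
  (p - spent + halfSumB (cell.drop k), (cell.take k).map (fun a => a + 1))

def cellStepB (st : List (List Int) × List (List (List Int))) (i j : Nat) :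
    List (List Int) × List (List (List Int)) :=
  let cell := pvGet2t st.2 i j
  if cell = [] then st
  else
    let r := cellB (pvGet2 st.1 i j) cell
    (pvSet2 st.1 i j r.1, pvSet2t st.2 i j r.2)

def spring_summer_alt (board : List (List Int)) (trees : List (List (List Int))) :
    List (List Int) × List (List (List Int)) :=
  (List.range board.length).foldl
    (fun st i =>
      (List.range (st.1.getD 0 []).length).foldl (fun st' j => cellStepB st' i j) st)
    (board, trees)

-- ===== PRECONDITION & SPEC =====
-- Pre_ excludes exactly the inputs on which A raises IndexError: for some visited (i, j)
-- (i over board's rows, j below the first board row's length) the trees entry is missing,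
-- or the cell is nonempty but board's row i has no column j.
def Pre_spring_summer (board : List (List Int)) (trees : List (List (List Int))) : Prop :=
  ∀ i < board.length, ∀ j < (board.headD []).length,
    i < trees.length ∧ j < (trees.getD i []).length ∧
      ((trees.getD i []).getD j [] ≠ [] → j < (board.getD i []).length)
instance (board : List (List Int)) (trees : List (List (List Int))) : Decidable (Pre_spring_summer board trees) := by unfold Pre_spring_summer; infer_instance

def pvWitness_spring_summer : List (List Int) × List (List (List Int)) :=
  ([[5, 1], [0, 3]], [[[1, 2], []], [[2], [1, 1, 4]]])

def Spec_spring_summer (board : List (List Int)) (trees : List (List (List Int))) (out : List (List Int) × List (List (List Int))) : Prop := out = spring_summer_alt board trees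
instance (board : List (List Int)) (trees : List (List (List Int))) (out : List (List Int) × List (List (List Int))) : Decidable (Spec_spring_summer board trees out) := by unfold Spec_spring_summer; infer_instance

-- ===== CLAIM (what is proved, stated in full; the proofs are below) =====
def Claim_equal_spring_summer : Prop := ∀ (board : List (List Int)) (trees : List (List (List Int))), Dom_spring_summer board trees → Pre_spring_summer board trees → Spec_spring_summer board trees (spring_summer board trees)

-- ===== LEMMAS AND PROOFS =====

-- the common recursive per-cell specification both per-cell codes meet
def cellTail (p : Int) : List Int → Int × List Int
  | [] => (p, [])
  | a :: r =>
    if a ≤ p then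
      let q := cellTail (p - a) r
      (q.1, (a + 1) :: q.2)
    else (p + halfSumB (a :: r), [])

theorem popLoopA_spec (tail : List Int) : ∀ (pre : List Int) (p : Int),
    popLoopA tail.length p (pre ++ tail) = (p + halfSumB tail, pre) := by
  induction tail using List.reverseRecOn with
  | nil => intro pre p; simp [popLoopA, halfSumB]
  | append_singleton t a ih =>
    intro pre p
    have h1 : (t ++ [a]).length = t.length + 1 := by simp
    have h2 : pre ++ (t ++ [a]) = (pre ++ t) ++ [a] := by simp
    rw [h1, h2]
    show popLoopA (t.length + 1) p ((pre ++ t) ++ [a]) = _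
    rw [popLoopA]
    simp only [List.getLastD_concat, List.dropLast_concat]
    rw [ih]
    have : halfSumB (t ++ [a]) = halfSumB t + PySem.Int.floordiv a 2 := by
      simp [halfSumB, List.foldl_append]
    rw [this]; ring_nf

theorem kLoopA_spec (rest : List Int) : ∀ (pre : List Int) (p : Int),
    kLoopA (pre.length + rest.length) p (pre ++ rest) pre.length =
      ((cellTail p rest).1, pre ++ (cellTail p rest).2) := by
  induction rest with
  | nil => intro pre p; rw [kLoopA]; simp [cellTail]
  | cons a r ih =>
    intro pre p
    rw [kLoopA]
    have hlt : pre.length < pre.length + (a :: r).length := by simp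
    rw [dif_pos hlt]
    have hget : (pre ++ a :: r).getD pre.length 0 = a := by
      simp [List.getD]
    rw [hget]
    by_cases hle : a ≤ p
    · rw [if_pos hle]
      have hset : (pre ++ a :: r).set pre.length (a + 1) = (pre ++ [a + 1]) ++ r := by
        rw [List.set_append_right _ _ (le_refl _)]
        simp
      have hlen : pre.length + (a :: r).length = (pre ++ [a + 1]).length + r.length := by
        simp; omega
      have hk : pre.length + 1 = (pre ++ [a + 1]).length := by simp
      rw [hset, hlen, hk, ih]
      simp [cellTail, hle]
    · rw [if_neg hle]
      have hlen : (pre ++ a :: r).length - pre.length = (a :: r).length := by simp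
      rw [hlen, popLoopA_spec]
      simp [cellTail, hle]

theorem prefixSumsB_shift (l : List Int) : ∀ (s t : Int),
    prefixSumsB (s + t) l = (prefixSumsB t l).map (fun c => s + c) := by
  induction l with
  | nil => intro s t; simp [prefixSumsB]
  | cons a r ih =>
    intro s t
    simp only [prefixSumsB, List.map_cons]
    have h1 : s + t + a = s + (t + a) := add_assoc s t a
    rw [h1, ih s (t + a)]

theorem prefixSumsB_length (l : List Int) : ∀ (s : Int), (prefixSumsB s l).length = l.length := by
  induction l with
  | nil => intro s; rfl
  | cons a r ih => intro s; simp [prefixSumsB, ih]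

theorem pvFindIdx?_lt_length {α : Type} (q : α → Bool) :
    ∀ (l : List α) (i : Nat), l.findIdx? q = some i → i < l.length := by
  intro l
  induction l with
  | nil => intro i h; simp at h
  | cons a r ih =>
    intro i h
    rw [List.findIdx?_cons] at h
    simp only [List.length_cons]
    by_cases hq : q a
    · simp [hq] at h; omega
    · simp [hq] at h
      obtain ⟨j, hj, hij⟩ := h
      have := ih j hj
      omega

theorem pvGetD_map_add (a : Int) (l : List Int) (m : Nat) (hm : m < l.length) :
    (l.map (fun c => a + c)).getD m 0 = a + l.getD m 0 := by
  simp [List.getD_eq_getElem?_getD, List.getElem?_map, List.getElem?_eq_getElem hm]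

theorem cellB_eval (p : Int) (cell : List Int) (K : Nat)
    (hk : (((prefixSumsB 0 cell).findIdx? (fun c => decide (p < c))).getD cell.length) = K) :
    cellB p cell =
      (p - (if K = 0 then 0 else (prefixSumsB 0 cell).getD (K - 1) 0) + halfSumB (cell.drop K),
       (cell.take K).map (fun a => a + 1)) := by
  simp only [cellB]
  rw [hk]

theorem cellB_eq_cellTail (cell : List Int) : ∀ (p : Int), cellB p cell = cellTail p cell := by
  induction cell with
  | nil => intro p; simp [cellB, cellTail, prefixSumsB, halfSumB, List.findIdx?]
  | cons a r ih =>
    intro p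
    have hcons0 : prefixSumsB 0 (a :: r) = (0 + a) :: prefixSumsB (0 + a) r := rfl
    by_cases hle : a ≤ p
    · -- head survives: split point is 1 + the tail's split point at nutrient p - a
      have hsh : prefixSumsB (0 + a) r = (prefixSumsB 0 r).map (fun c => a + c) := by
        have h0 : (0 : Int) + a = a + 0 := by ring
        rw [h0, prefixSumsB_shift]
      have hcons : prefixSumsB 0 (a :: r) = (0 + a) :: (prefixSumsB 0 r).map (fun c => a + c) := by
        rw [hcons0, hsh]
      have hmap : ((prefixSumsB 0 r).map (fun c => a + c)).findIdx? (fun c => decide (p < c))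
          = (prefixSumsB 0 r).findIdx? (fun c => decide (p - a < c)) := by
        rw [List.findIdx?_map]
        congr 1
        funext c
        simp only [Function.comp_apply]
        exact decide_eq_decide.mpr (by omega)
      have hd : decide (p < 0 + a) = false := by
        simp only [decide_eq_false_iff_not]; omega
      -- the split point K of the tail call
      obtain ⟨K, hK, hKle⟩ :
          ∃ K, ((prefixSumsB 0 r).findIdx? (fun c => decide (p - a < c))).getD r.length = K ∧
            K ≤ r.length := by
        cases hFe : (prefixSumsB 0 r).findIdx? (fun c => decide (p - a < c)) with
        | none => exact ⟨r.length, rfl, le_refl _⟩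
        | some k' =>
            have hlt := pvFindIdx?_lt_length _ _ _ hFe
            rw [prefixSumsB_length] at hlt
            exact ⟨k', rfl, le_of_lt hlt⟩
      have hKcons :
          (((prefixSumsB 0 (a :: r)).findIdx? (fun c => decide (p < c))).getD (a :: r).length)
            = K + 1 := by
        rw [hcons, List.findIdx?_cons]
        rw [hd]
        simp only [Bool.false_eq_true, if_false, hmap]
        cases hFe : (prefixSumsB 0 r).findIdx? (fun c => decide (p - a < c)) with
        | none => rw [hFe] at hK; simp at hK; simp [hK]
        | some k' => rw [hFe] at hK; simp at hK; simp [hK]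
      rw [cellB_eval p (a :: r) (K + 1) hKcons]
      have hspent : (prefixSumsB 0 (a :: r)).getD K 0
          = a + (if K = 0 then 0 else (prefixSumsB 0 r).getD (K - 1) 0) := by
        rw [hcons]
        cases K with
        | zero => simp
        | succ m =>
            have hm : m < (prefixSumsB 0 r).length := by rw [prefixSumsB_length]; omega
            simp only [List.getD_cons_succ, if_neg (Nat.succ_ne_zero m), Nat.succ_sub_one]
            exact pvGetD_map_add a _ m hm
      have htail := cellB_eval (p - a) r K hK
      rw [ih (p - a)] at htail
      simp only [cellTail, hle, if_true, htail]
      simp only [Nat.add_sub_cancel, hspent, List.drop_succ_cons, List.take_succ_cons,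
        List.map_cons]
      rw [Prod.mk.injEq]
      exact ⟨by rw [if_neg (Nat.succ_ne_zero K)]; ring, rfl⟩
    · -- head dies immediately: split point 0, everything halved
      have hk0 :
          (((prefixSumsB 0 (a :: r)).findIdx? (fun c => decide (p < c))).getD (a :: r).length)
            = 0 := by
        rw [hcons0, List.findIdx?_cons]
        have hd : decide (p < 0 + a) = true := by
          simp only [decide_eq_true_eq]; omega
        rw [hd]
        simp
      rw [cellB_eval p (a :: r) 0 hk0]
      simp [cellTail, hle]

theorem cellStep_eq : cellStepA = cellStepB := by
  funext st i j
  simp only [cellStepA, cellStepB]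
  by_cases h : pvGet2t st.2 i j = []
  · simp [h]
  · simp only [h, if_false]
    have h1 := kLoopA_spec (pvGet2t st.2 i j) [] (pvGet2 st.1 i j)
    simp only [List.nil_append, List.length_nil, Nat.zero_add] at h1
    rw [h1, cellB_eq_cellTail]

-- ===== VERDICT (by name: the statement is the Claim_ definition above) =====
theorem spring_summer_spec : Claim_equal_spring_summer := by
  intro board trees _ _
  unfold Spec_spring_summer spring_summer spring_summer_alt
  rw [cellStep_eq]
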